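-- pv_equiv track=rewrite | github.com/On0n0k1/2020ASSEditor | Dados/Events/Evento/Timing.py | _fitlista
-- ===== SOURCE A (Python) =====
-- def _fitlista(lista):
--     """ Turns an integer list into a [h, mm, ss, cs] time format.
--
--         :param lista: Integer list. length between 0 and 4, inclusive.
--         :return: Integer list [hours, minutes, seconds, centiseconds].
--
--         Called by __init__()
--
--         lista               ->      return
--
--         []                  ->      [0, 0, 0, 0]
--
--         [x1]                ->      [0, 0, x1, 0]
--
--         [x1, x2]            ->      [0, x1, x2, 0]
--
--         [x1, x2, x3]        ->      [x1, x2, x3, 0]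
--
--         [x1, x2, x3, x4]    ->      [x1, x2, x3, x4]"""
--
--     if isinstance(lista, list) is False:
--         raise TypeError(f"{lista} must be a list.")
--     if len(lista) > 4:
--         raise ValueError(f"{lista} may only have 0 to 4 values.")
--     for _ in lista:
--         if isinstance(_, int) is False:
--             raise ValueError(f"{lista} all elements must be Integers.")
--
--     # if len(lista) == 0
--     saida = [0, 0, 0, 0]
--     if len(lista) == 4:
--         saida = [lista[_] for _ in range(4)]
--     elif len(lista) == 3:
--         saida = [lista[0], lista[1], lista[2], 0]
--     elif len(lista) == 2:
--         saida = [0, lista[0], lista[1], 0]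
--     elif len(lista) == 1:
--         saida = [0, 0, lista[0], 0]
--     return saida
-- ===== SOURCE B (Python) =====
-- def _fitlista(lista):
--     if isinstance(lista, list) is False:
--         raise TypeError(f"{lista} must be a list.")
--     if len(lista) > 4:
--         raise ValueError(f"{lista} may only have 0 to 4 values.")
--     for _ in lista:
--         if isinstance(_, int) is False:
--             raise ValueError(f"{lista} all elements must be Integers.")
--     if len(lista) == 4:
--         return lista[:]
--     # grow iteratively: prepend zeros until the [h, mm, ss] part is full,
--     # then append the centiseconds slot
--     out = list(lista)
--     while len(out) < 3:
--         out.insert(0, 0)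
--     out.append(0)
--     return out
-- ===== Notes on version B (the rewrite author's own statement) =====
-- stated objective: simpler
-- what changed: Replaces A's five-way length-case enumeration with an iterative padding loop: copy the list, prepend zeros one at a time until the hours/minutes/seconds part has length 3, then append the centiseconds 0 (length-4 input is returned as a copy).
import Mathlib
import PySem

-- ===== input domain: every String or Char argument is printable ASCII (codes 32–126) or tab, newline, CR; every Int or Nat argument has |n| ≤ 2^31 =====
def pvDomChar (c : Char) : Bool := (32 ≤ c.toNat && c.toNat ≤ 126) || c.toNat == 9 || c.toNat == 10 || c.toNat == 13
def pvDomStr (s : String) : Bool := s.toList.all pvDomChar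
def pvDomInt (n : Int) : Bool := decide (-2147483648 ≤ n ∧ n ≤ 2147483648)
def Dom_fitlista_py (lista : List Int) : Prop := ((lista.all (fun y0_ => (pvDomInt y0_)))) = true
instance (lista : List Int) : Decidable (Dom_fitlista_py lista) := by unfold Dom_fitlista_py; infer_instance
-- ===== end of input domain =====

-- B replaces A's five-way length-case enumeration with an iterative padding loop
-- (prepend zeros until length 3, then append a 0); objective: simpler.

-- ===== PORT A =====
def fitlista_py (lista : List Int) : List Int :=
  -- saida = [0, 0, 0, 0], then the branch chain on len(lista)
  let saida : List Int := [0, 0, 0, 0]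
  if lista.length = 4 then
    (PySem.List.pyRange 0 4 1).map (fun i => (PySem.List.pyGet? lista i).getD 0)  -- index always in range in this branch
  else if lista.length = 3 then
    [(PySem.List.pyGet? lista 0).getD 0, (PySem.List.pyGet? lista 1).getD 0, (PySem.List.pyGet? lista 2).getD 0, 0]
  else if lista.length = 2 then
    [0, (PySem.List.pyGet? lista 0).getD 0, (PySem.List.pyGet? lista 1).getD 0, 0]
  else if lista.length = 1 then
    [0, 0, (PySem.List.pyGet? lista 0).getD 0, 0]
  else
    saida

-- ===== PORT B =====
-- the 'while len(out) < 3: out.insert(0, 0)' loop of Source B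
-- fuel = 3 suffices: each iteration grows the list by one and the loop runs while length < 3
def fitlistaPad : Nat → List Int → List Int
  | 0, out => out
  | k + 1, out => if out.length < 3 then fitlistaPad k (0 :: out) else out

def fitlista_py_alt (lista : List Int) : List Int :=
  if lista.length = 4 then lista
  else fitlistaPad 3 lista ++ [0]

-- ===== PRECONDITION & SPEC =====
-- Pre_ excludes exactly the inputs where A raises ValueError: lists longer than 4.
def Pre_fitlista_py (lista : List Int) : Prop := lista.length ≤ 4
instance (lista : List Int) : Decidable (Pre_fitlista_py lista) := by unfold Pre_fitlista_py; infer_instance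
def pvWitness_fitlista_py : List Int := [1, 2, 3]
def Spec_fitlista_py (lista : List Int) (out : List Int) : Prop := out = fitlista_py_alt lista
instance (lista : List Int) (out : List Int) : Decidable (Spec_fitlista_py lista out) := by unfold Spec_fitlista_py; infer_instance

-- ===== CLAIM =====
def Claim_equal_fitlista_py : Prop := ∀ (lista : List Int), Dom_fitlista_py lista → Pre_fitlista_py lista → Spec_fitlista_py lista (fitlista_py lista)

-- ===== LEMMAS AND PROOFS =====

-- ===== VERDICT =====
theorem fitlista_py_spec : Claim_equal_fitlista_py := by
  intro lista _ hpre
  unfold Spec_fitlista_py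
  match lista with
  | [] => rfl
  | [a] => rfl
  | [a, b] => rfl
  | [a, b, c] => rfl
  | [a, b, c, d] => rfl
  | _ :: _ :: _ :: _ :: _ :: _ =>
      exact absurd hpre (by unfold Pre_fitlista_py; simp)
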